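-- pv_equiv track=rewrite | github.com/ilaydaylmz/sifrelemeUygulamasi | sifrelemeUygulamasi/dogrusalSifreleme.py | dogrusal_sifrele
-- ===== SOURCE A (Python) =====
-- def dogrusal_sifrele(metin, a, b):
--         sifreli_metin = ""
--         for karakter in metin:
--             if karakter.isalpha():
--                 buyuk_harf = karakter.isupper()
--                 karakter_sira = ord(karakter.upper()) - ord('A')
--                 sifreli_sira = (a * karakter_sira + b) % 26
--                 sifreli_karakter = chr(sifreli_sira + ord('A'))
--                 if buyuk_harf:
--                     sifreli_metin += sifreli_karakter
--                 else:
--                     sifreli_metin += sifreli_karakter.lower()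
--             else:
--                 sifreli_metin += karakter
--         return sifreli_metin
-- ===== SOURCE B (Python) =====
-- def dogrusal_sifrele(metin, a, b):
--     abc = 'ABCDEFGHIJKLMNOPQRSTUVWXYZ'
--     enc = ''.join(abc[(a * i + b) % 26] for i in range(26))
--     table = str.maketrans(abc + abc.lower(), enc + enc.lower())
--     return metin.translate(table)
-- ===== Notes on version B (the rewrite author's own statement) =====
-- stated objective: idiomatic
-- what changed: B precomputes a 52-entry translation table (str.maketrans over both cases of the alphabet) and maps the whole string through it with one str.translate call, instead of A's per-character isalpha/isupper branching and affine arithmetic with string concatenation.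
import Mathlib
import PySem

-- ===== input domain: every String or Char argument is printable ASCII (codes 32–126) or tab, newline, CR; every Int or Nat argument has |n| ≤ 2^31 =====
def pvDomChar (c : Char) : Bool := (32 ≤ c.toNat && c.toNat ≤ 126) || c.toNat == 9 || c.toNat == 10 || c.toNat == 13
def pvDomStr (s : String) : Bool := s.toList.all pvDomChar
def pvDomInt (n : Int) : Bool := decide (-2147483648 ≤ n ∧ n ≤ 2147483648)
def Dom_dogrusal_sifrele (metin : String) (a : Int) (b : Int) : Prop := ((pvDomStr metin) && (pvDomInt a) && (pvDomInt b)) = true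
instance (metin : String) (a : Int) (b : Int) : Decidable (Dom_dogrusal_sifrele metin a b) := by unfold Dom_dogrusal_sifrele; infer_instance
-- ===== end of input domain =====

-- B replaces A's per-character branching and affine arithmetic by a precomputed
-- 52-entry translation table applied in one str.translate pass (idiomatic; measured faster).

-- ===== PORT A =====
def dogrusal_sifrele (metin : String) (a : Int) (b : Int) : String :=
  String.ofList (metin.toList.foldl (fun sifreli_metin karakter =>
    if PySem.Chars.isalpha karakter then
      let buyuk_harf := PySem.Chars.isupper karakter
      let karakter_sira : Int := ((PySem.Chars.upperChar karakter).toNat : Int) - 65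
      let sifreli_sira : Int := PySem.Int.mod (a * karakter_sira + b) 26
      let sifreli_karakter : Char := Char.ofNat (sifreli_sira.toNat + 65)
      if buyuk_harf then sifreli_metin ++ [sifreli_karakter]
      else sifreli_metin ++ [PySem.Chars.lowerChar sifreli_karakter]
    else sifreli_metin ++ [karakter]) [])

-- ===== PORT B =====
-- str.maketrans(x, y) is ported by hand as the dict built from zip(x, y) (exact: keys here
-- are distinct single chars); metin.translate(table) maps each code point through the table,
-- identity when absent (exact for these one-char keys and values).
def dogrusal_sifrele_alt (metin : String) (a : Int) (b : Int) : String :=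
  let abc : List Char := "ABCDEFGHIJKLMNOPQRSTUVWXYZ".toList
  let enc : List Char := (PySem.List.pyRange 0 26 1).map
    (fun i => PySem.List.pyGetD abc (PySem.Int.mod (a * i + b) 26) 'A')
  let table : PySem.Dict Char Char :=
    PySem.Dict.ofList ((abc ++ PySem.Chars.lower abc).zip (enc ++ PySem.Chars.lower enc))
  String.ofList (metin.toList.map (fun c => (table.get? c).getD c))

-- ===== PRECONDITION & SPEC =====
def Spec_dogrusal_sifrele (metin : String) (a : Int) (b : Int) (out : String) : Prop := out = dogrusal_sifrele_alt metin a b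
instance (metin : String) (a : Int) (b : Int) (out : String) : Decidable (Spec_dogrusal_sifrele metin a b out) := by unfold Spec_dogrusal_sifrele; infer_instance

-- ===== CLAIM (what is proved, stated in full; the proofs are below) =====
def Claim_equal_dogrusal_sifrele : Prop := ∀ (metin : String) (a : Int) (b : Int), Dom_dogrusal_sifrele metin a b → Spec_dogrusal_sifrele metin a b (dogrusal_sifrele metin a b)

-- ===== LEMMAS AND PROOFS =====

-- proof-side names for B's let-bound data
def pvAbc : List Char := "ABCDEFGHIJKLMNOPQRSTUVWXYZ".toList
def pvKeys : List Char := pvAbc ++ PySem.Chars.lower pvAbc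
def pvEnc (a b : Int) : List Char := (PySem.List.pyRange 0 26 1).map
  (fun i => PySem.List.pyGetD pvAbc (PySem.Int.mod (a * i + b) 26) 'A')
def pvVals (a b : Int) : List Char := pvEnc a b ++ PySem.Chars.lower (pvEnc a b)
def pvTable (a b : Int) : PySem.Dict Char Char := PySem.Dict.ofList (pvKeys.zip (pvVals a b))
-- the single character A appends for input character c
def pvFA (a b : Int) (c : Char) : Char :=
  if PySem.Chars.isalpha c then
    let buyuk_harf := PySem.Chars.isupper c
    let karakter_sira : Int := ((PySem.Chars.upperChar c).toNat : Int) - 65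
    let sifreli_sira : Int := PySem.Int.mod (a * karakter_sira + b) 26
    let sifreli_karakter : Char := Char.ofNat (sifreli_sira.toNat + 65)
    if buyuk_harf then sifreli_karakter else PySem.Chars.lowerChar sifreli_karakter
  else c

theorem char_toNat_ofNat (n : Nat) (h : n < 55296) : (Char.ofNat n).toNat = n := by
  simp [Char.ofNat, Char.toNat, Char.ofNatAux, Nat.isValidChar, h]

theorem isupper_bounds (c : Char) (h : PySem.Chars.isupper c = true) :
    65 ≤ c.toNat ∧ c.toNat ≤ 90 := by
  unfold PySem.Chars.isupper at h
  rw [Bool.and_eq_true, decide_eq_true_iff, decide_eq_true_iff] at h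
  obtain ⟨h1, h2⟩ := h
  rw [Char.le_def, UInt32.le_iff_toNat_le] at h1 h2
  exact ⟨h1, h2⟩

theorem islower_bounds (c : Char) (h : PySem.Chars.islower c = true) :
    97 ≤ c.toNat ∧ c.toNat ≤ 122 := by
  unfold PySem.Chars.islower at h
  rw [Bool.and_eq_true, decide_eq_true_iff, decide_eq_true_iff] at h
  obtain ⟨h1, h2⟩ := h
  rw [Char.le_def, UInt32.le_iff_toNat_le] at h1 h2
  exact ⟨h1, h2⟩

theorem length_pvKeys : pvKeys.length = 52 := by decide

theorem length_pvEnc (a b : Int) : (pvEnc a b).length = 26 := by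
  simp [pvEnc, PySem.List.length_pyRange_one]

theorem length_pvVals (a b : Int) : (pvVals a b).length = 52 := by
  simp [pvVals, PySem.Chars.lower, length_pvEnc]

theorem pvEnc_getElem (a b : Int) (j : Nat) (hj : j < 26) :
    (pvEnc a b)[j]'(by rw [length_pvEnc]; exact hj) =
      Char.ofNat ((PySem.Int.mod (a * (j : Int) + b) 26).toNat + 65) := by
  have hr0 : (0:Int) < 26 := by norm_num
  have hge := PySem.Int.mod_nonneg (a * (j : Int) + b) hr0
  have hlt := PySem.Int.mod_lt (a * (j : Int) + b) hr0
  have habcD : ∀ m : Nat, m < 26 → pvAbc.getD m 'A' = Char.ofNat (m + 65) := by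
    intro m hm; interval_cases m <;> rfl
  simp only [pvEnc, List.getElem_map]
  rw [PySem.List.getElem_pyRange_one]
  rw [show (0 : Int) + (j:Int) = (j:Int) by ring]
  rw [PySem.List.pyGetD_of_nonneg]
  · rw [habcD _ (by omega)]
  · exact hge

theorem pvTable_items (a b : Int) :
    (pvTable a b).items = pvKeys.zip (pvVals a b) := by
  have hmapfst : (pvKeys.zip (pvVals a b)).map Prod.fst = pvKeys :=
    List.map_fst_zip (by rw [length_pvKeys, length_pvVals])
  have h := PySem.Dict.items_foldl_insert_fresh (l := pvKeys.zip (pvVals a b))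
      (k := Prod.fst) (v := Prod.snd) (d := PySem.Dict.empty)
      (by intro p _; exact PySem.Dict.contains_empty _)
      (by rw [hmapfst]; decide)
  unfold pvTable PySem.Dict.ofList PySem.Dict.update
  simpa using h

theorem pvTable_keys (a b : Int) : (pvTable a b).keys = pvKeys := by
  simp only [PySem.Dict.keys]
  rw [pvTable_items]
  exact List.map_fst_zip (by rw [length_pvKeys, length_pvVals])

theorem pvTable_keys_nodup (a b : Int) : (pvTable a b).keys.Nodup := by
  rw [pvTable_keys]; decide

theorem get?_pvTable_at (a b : Int) (j : Nat) (hj : j < 52) :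
    (pvTable a b).get? (pvKeys[j]'(by rw [length_pvKeys]; exact hj)) =
      some ((pvVals a b)[j]'(by rw [length_pvVals]; exact hj)) := by
  have hz : j < (pvKeys.zip (pvVals a b)).length := by
    rw [List.length_zip, length_pvKeys, length_pvVals]; omega
  have hmem : (pvKeys[j]'(by rw [length_pvKeys]; exact hj),
      (pvVals a b)[j]'(by rw [length_pvVals]; exact hj)) ∈ pvKeys.zip (pvVals a b) := by
    have := List.getElem_zip (l := pvKeys) (l' := pvVals a b) (i := j) (h := hz)
    rw [← this]
    exact List.getElem_mem _
  rw [← pvTable_items] at hmem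
  exact PySem.Dict.get?_of_mem_items _ hmem (pvTable_keys_nodup a b)

set_option maxRecDepth 4000 in
theorem get?_pvTable_none (a b : Int) (c : Char) (h : c ∉ pvKeys) :
    (pvTable a b).get? c = none := by
  rw [PySem.Dict.get?_eq_none_iff_not_mem_keys, pvTable_keys]
  exact h

theorem pvKeys_alpha_all : pvKeys.all PySem.Chars.isalpha = true := by rfl
theorem pvKeys_alpha : ∀ x ∈ pvKeys, PySem.Chars.isalpha x = true :=
  List.all_eq_true.mp pvKeys_alpha_all

theorem step_eq (a b : Int) (c : Char) :
    pvFA a b c = ((pvTable a b).get? c).getD c := by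
  by_cases ha : PySem.Chars.isalpha c = true
  · have ha' := ha
    unfold PySem.Chars.isalpha at ha'
    rw [Bool.or_eq_true] at ha'
    by_cases hu : PySem.Chars.isupper c = true
    · -- uppercase letter
      obtain ⟨h1, h2⟩ := isupper_bounds c hu
      have hj : c.toNat - 65 < 52 := by omega
      have habc : ∀ (m : Nat) (hm : m < 26),
          pvAbc[m]'(by rw [show pvAbc.length = 26 from by decide]; exact hm) =
            Char.ofNat (m + 65) := by
        intro m hm; interval_cases m <;> rfl
      have hkey : pvKeys[c.toNat - 65]'(by rw [length_pvKeys]; exact hj) = c := by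
        unfold pvKeys
        rw [List.getElem_append_left (by rw [show pvAbc.length = 26 from by decide]; omega)]
        rw [habc _ (by omega)]
        rw [show c.toNat - 65 + 65 = c.toNat by omega]
        exact Char.ofNat_toNat c
      have hget := get?_pvTable_at a b (c.toNat - 65) hj
      rw [hkey] at hget
      rw [hget]
      have hval : (pvVals a b)[c.toNat - 65]'(by rw [length_pvVals]; exact hj) =
          Char.ofNat ((PySem.Int.mod (a * ((c.toNat - 65 : Nat) : Int) + b) 26).toNat + 65) := by
        unfold pvVals
        rw [List.getElem_append_left (by rw [length_pvEnc]; omega)]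
        exact pvEnc_getElem a b (c.toNat - 65) (by omega)
      rw [hval]
      have hupper : PySem.Chars.upperChar c = c := by
        unfold PySem.Chars.upperChar
        rw [if_neg]
        intro hl
        have := islower_bounds c hl
        omega
      simp only [pvFA, ha, hu, if_true, hupper, Option.getD_some]
      have : ((c.toNat : Int) - 65) = (((c.toNat - 65 : Nat)) : Int) := by omega
      rw [this]
    · -- lowercase letter
      have hl : PySem.Chars.islower c = true := by
        rcases ha' with h | h
        · exact absurd h hu
        · exact h
      obtain ⟨h1, h2⟩ := islower_bounds c hl
      have hj : 26 + (c.toNat - 97) < 52 := by omega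
      have hlowabc : PySem.Chars.lower pvAbc = "abcdefghijklmnopqrstuvwxyz".toList := by decide
      have hlow : ∀ (m : Nat) (hm : m < 26),
          (PySem.Chars.lower pvAbc)[m]'(by
            rw [show (PySem.Chars.lower pvAbc).length = 26 from by decide]; exact hm) =
            Char.ofNat (m + 97) := by
        intro m hm
        simp only [hlowabc]
        interval_cases m <;> rfl
      have hkey : pvKeys[26 + (c.toNat - 97)]'(by rw [length_pvKeys]; exact hj) = c := by
        unfold pvKeys
        rw [List.getElem_append_right (by rw [show pvAbc.length = 26 from by decide]; omega)]
        have hidx : 26 + (c.toNat - 97) - pvAbc.length = c.toNat - 97 := by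
          rw [show pvAbc.length = 26 from by decide]; omega
        simp only [hidx]
        rw [hlow _ (by omega)]
        rw [show c.toNat - 97 + 97 = c.toNat by omega]
        exact Char.ofNat_toNat c
      have hget := get?_pvTable_at a b (26 + (c.toNat - 97)) hj
      rw [hkey] at hget
      rw [hget]
      have hval : (pvVals a b)[26 + (c.toNat - 97)]'(by rw [length_pvVals]; exact hj) =
          PySem.Chars.lowerChar
            (Char.ofNat ((PySem.Int.mod (a * ((c.toNat - 97 : Nat) : Int) + b) 26).toNat + 65)) := by
        unfold pvVals
        rw [List.getElem_append_right (by rw [length_pvEnc]; omega)]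
        have hidx : 26 + (c.toNat - 97) - (pvEnc a b).length = c.toNat - 97 := by
          rw [length_pvEnc]; omega
        simp only [hidx]
        unfold PySem.Chars.lower
        rw [List.getElem_map]
        rw [pvEnc_getElem a b (c.toNat - 97) (by omega)]
      rw [hval]
      have hupper : PySem.Chars.upperChar c = Char.ofNat (c.toNat - 32) := by
        unfold PySem.Chars.upperChar
        rw [if_pos hl]
      have hfalse : PySem.Chars.isupper c = false := by
        rw [Bool.eq_false_iff]; exact hu
      simp only [pvFA, ha, hfalse, if_true, if_false, Bool.false_eq_true, hupper,
        Option.getD_some]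
      have htn : (Char.ofNat (c.toNat - 32)).toNat = c.toNat - 32 :=
        char_toNat_ofNat _ (by omega)
      rw [htn]
      have : (((c.toNat - 32 : Nat) : Int) - 65) = (((c.toNat - 97 : Nat)) : Int) := by
        omega
      rw [this]
  · -- not a letter
    have hmem : c ∉ pvKeys := fun hmem => ha (pvKeys_alpha c hmem)
    rw [get?_pvTable_none a b c hmem]
    simp only [pvFA, ha, if_false, Bool.false_eq_true, Option.getD_none]

theorem foldl_append_singleton (f : Char → Char) (l acc : List Char) :
    l.foldl (fun acc c => acc ++ [f c]) acc = acc ++ l.map f := by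
  induction l generalizing acc with
  | nil => simp
  | cons x xs ih => simp [ih]

theorem A_eq_map (metin : String) (a b : Int) :
    dogrusal_sifrele metin a b = String.ofList (metin.toList.map (pvFA a b)) := by
  unfold dogrusal_sifrele
  have hstep : (fun (sifreli_metin : List Char) (karakter : Char) =>
      if PySem.Chars.isalpha karakter then
        let buyuk_harf := PySem.Chars.isupper karakter
        let karakter_sira : Int := ((PySem.Chars.upperChar karakter).toNat : Int) - 65
        let sifreli_sira : Int := PySem.Int.mod (a * karakter_sira + b) 26
        let sifreli_karakter : Char := Char.ofNat (sifreli_sira.toNat + 65)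
        if buyuk_harf then sifreli_metin ++ [sifreli_karakter]
        else sifreli_metin ++ [PySem.Chars.lowerChar sifreli_karakter]
      else sifreli_metin ++ [karakter]) =
      (fun acc c => acc ++ [pvFA a b c]) := by
    funext acc c
    simp only [pvFA]
    by_cases h : PySem.Chars.isalpha c = true <;>
      by_cases hu : PySem.Chars.isupper c = true <;> simp [h, hu]
  rw [hstep, foldl_append_singleton]
  simp

set_option maxRecDepth 4000 in
set_option maxRecDepth 4000 in
theorem B_eq_map (metin : String) (a b : Int) :
    dogrusal_sifrele_alt metin a b =
      String.ofList (metin.toList.map (fun c => ((pvTable a b).get? c).getD c)) := by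
  unfold dogrusal_sifrele_alt pvTable pvVals pvEnc pvKeys pvAbc
  rfl

-- ===== VERDICT (by name: the statement is the Claim_ definition above) =====
theorem dogrusal_sifrele_spec : Claim_equal_dogrusal_sifrele := by
  intro metin a b _
  unfold Spec_dogrusal_sifrele
  rw [A_eq_map, B_eq_map]
  exact congrArg String.ofList (List.map_congr_left (fun c _ => step_eq a b c))
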